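-- pv_equiv track=rewrite | github.com/YooGunWook/coding_test | 해시/전화번호 목록.py | solution
-- ===== SOURCE A (Python) =====
-- def solution(phone_book):
--     phone_book = sorted(phone_book)
--     first_num = phone_book[0]
--     phone_book.pop(0)
--     for phone_num in phone_book:
--         if phone_num.startswith(first_num):
--             return False
--     return True
-- ===== SOURCE B (Python) =====
-- def solution(phone_book):
--     smallest = phone_book[0]
--     for num in phone_book:
--         if num < smallest:
--             smallest = num
--     skipped = False
--     for num in phone_book:
--         if not skipped and num == smallest:
--             skipped = True
--         elif num.startswith(smallest):
--             return False
--     return True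
-- ===== Notes on version B (the rewrite author's own statement) =====
-- stated objective: faster
-- what changed: Replaces sort-then-scan with two linear passes: find the lexicographic minimum, then scan once skipping one occurrence of it and testing startswith.
-- outside the precondition, e.g. on solution([]): A raises IndexError, B raises IndexError
import Mathlib
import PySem

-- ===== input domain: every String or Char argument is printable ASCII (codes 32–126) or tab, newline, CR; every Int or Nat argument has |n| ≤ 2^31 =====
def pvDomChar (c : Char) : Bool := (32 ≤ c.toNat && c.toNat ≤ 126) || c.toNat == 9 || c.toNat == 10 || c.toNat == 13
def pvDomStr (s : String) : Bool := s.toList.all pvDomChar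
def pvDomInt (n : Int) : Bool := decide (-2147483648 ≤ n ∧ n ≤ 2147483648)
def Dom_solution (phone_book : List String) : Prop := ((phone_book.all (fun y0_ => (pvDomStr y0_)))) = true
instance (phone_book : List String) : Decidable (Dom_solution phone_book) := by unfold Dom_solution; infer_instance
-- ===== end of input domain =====

-- B replaces A's sort-then-scan by two linear passes (find the minimum, then scan once
-- skipping one occurrence of it): no sorting. A rebinds its parameter to a new sorted
-- list, so the caller's list is not mutated.

-- ===== PORT A =====
-- the for-loop with its early `return False`
def loopA (first : String) : List String → Bool
  | [] => true
  | p :: ps => if PySem.Str.startswith p first then false else loopA first ps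

def solution (phone_book : List String) : Bool :=
  match PySem.List.sorted phone_book (fun x => x) false with
  | [] => false   -- phone_book[0] raises IndexError here; excluded by Pre_solution
  | first :: rest => loopA first rest

-- ===== PORT B =====
-- first pass: running minimum
def minPass : String → List String → String
  | s, [] => s
  | s, x :: xs => minPass (if x < s then x else s) xs

-- second pass: skip one occurrence of `smallest`, fail on any other prefix hit
def checkPass (smallest : String) : Bool → List String → Bool
  | _, [] => true
  | skipped, x :: xs =>
    if !skipped && x == smallest then checkPass smallest true xs
    else if PySem.Str.startswith x smallest then false
    else checkPass smallest skipped xs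

def solution_alt (phone_book : List String) : Bool :=
  match phone_book with
  | [] => false   -- phone_book[0] raises IndexError here; excluded by Pre_solution
  | h :: t => checkPass (minPass h (h :: t)) false (h :: t)

-- ===== PRECONDITION & SPEC =====
-- A (and B alike) raise IndexError on the empty list (phone_book[0]); that is the only exclusion.
def Pre_solution (phone_book : List String) : Prop := phone_book ≠ []
instance (phone_book : List String) : Decidable (Pre_solution phone_book) := by unfold Pre_solution; infer_instance
def pvWitness_solution : List String := (["119", "97674223", "1195524421"])

def Spec_solution (phone_book : List String) (out : Bool) : Prop := out = solution_alt phone_book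
instance (phone_book : List String) (out : Bool) : Decidable (Spec_solution phone_book out) := by unfold Spec_solution; infer_instance

-- ===== CLAIM (what is proved, stated in full; the proofs are below) =====
def Claim_equal_solution : Prop := ∀ (phone_book : List String), Dom_solution phone_book → Pre_solution phone_book → Spec_solution phone_book (solution phone_book)

-- ===== LEMMAS AND PROOFS =====

theorem startswith_self (s : String) : PySem.Chars.startswith s.toList s.toList = true := by
  simp [PySem.Chars.startswith_iff]

theorem loopA_true_iff (f : String) (l : List String) :
    loopA f l = true ↔ l.countP (fun x => PySem.Chars.startswith x.toList f.toList) = 0 := by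
  induction l with
  | nil => simp [loopA]
  | cons p ps ih =>
    by_cases h : PySem.Chars.startswith p.toList f.toList = true
    · simp [loopA, h]
    · simp [loopA, h, ih]

theorem checkPass_true_iff (s : String) (l : List String) :
    checkPass s true l = true ↔ l.countP (fun x => PySem.Chars.startswith x.toList s.toList) = 0 := by
  induction l with
  | nil => simp [checkPass]
  | cons x xs ih =>
    by_cases h : PySem.Chars.startswith x.toList s.toList = true
    · simp [checkPass, h]
    · simp [checkPass, h, ih]

theorem checkPass_false_iff (s : String) (l : List String) (hmem : s ∈ l) :
    checkPass s false l = true ↔ l.countP (fun x => PySem.Chars.startswith x.toList s.toList) = 1 := by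
  induction l with
  | nil => cases hmem
  | cons x xs ih =>
    by_cases hx : x = s
    · subst hx
      simp only [checkPass, beq_self_eq_true, Bool.not_false, Bool.true_and, if_true,
        checkPass_true_iff, List.countP_cons, startswith_self]
      omega
    · have hs : s ∈ xs := by
        rcases List.mem_cons.mp hmem with h | h
        · exact absurd h.symm hx
        · exact h
      have hbeq : (x == s) = false := by simpa using hx
      by_cases hp : PySem.Chars.startswith x.toList s.toList = true
      · have hpos : 0 < xs.countP (fun x => PySem.Chars.startswith x.toList s.toList) :=
          List.countP_pos_iff.mpr ⟨s, hs, startswith_self s⟩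
        simp only [checkPass, hbeq, Bool.not_false, Bool.true_and,
          PySem.Str.startswith_eq, hp, if_true, List.countP_cons]
        constructor
        · intro h; cases h
        · intro h; omega
      · simp [checkPass, hbeq, hp, ih hs]

theorem minPass_spec (l : List String) : ∀ (s : String),
    minPass s l ∈ s :: l ∧ ∀ y ∈ s :: l, minPass s l ≤ y := by
  induction l with
  | nil => intro s; simp [minPass]
  | cons x xs ih =>
    intro s
    obtain ⟨hmem, hle⟩ := ih (if x < s then x else s)
    have heq : minPass s (x :: xs) = minPass (if x < s then x else s) xs := rfl
    have h0 : minPass (if x < s then x else s) xs ≤ (if x < s then x else s) :=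
      hle _ (List.mem_cons_self ..)
    have hb : minPass s (x :: xs) ≤ s ∧ minPass s (x :: xs) ≤ x := by
      rw [heq]
      by_cases hxs : x < s
      · rw [if_pos hxs] at h0 ⊢
        exact ⟨le_of_lt (lt_of_le_of_lt h0 hxs), h0⟩
      · rw [if_neg hxs] at h0 ⊢
        exact ⟨h0, le_trans h0 (le_of_not_gt hxs)⟩
    obtain ⟨hls, hlx⟩ := hb
    refine ⟨?_, ?_⟩
    · rw [heq]
      rcases List.mem_cons.mp hmem with h | h
      · rw [h]; split_ifs with hxs
        · exact List.mem_cons_of_mem _ (List.mem_cons_self ..)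
        · exact List.mem_cons_self ..
      · exact List.mem_cons_of_mem _ (List.mem_cons_of_mem _ h)
    · intro y hy
      rcases List.mem_cons.mp hy with h | h
      · exact h ▸ hls
      · rcases List.mem_cons.mp h with h' | h'
        · exact h' ▸ hlx
        · rw [heq]; exact hle y (List.mem_cons_of_mem _ h')

-- ===== VERDICT (by name: the statement is the Claim_ definition above) =====
theorem solution_spec : Claim_equal_solution := by
  intro phone_book _ hpre
  unfold Spec_solution
  cases phone_book with
  | nil => exact absurd rfl hpre
  | cons h t =>
    rcases hsrt : PySem.List.sorted (h :: t) (fun x => x) false with _ | ⟨f, rest⟩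
    · exact absurd ((PySem.List.sorted_eq_nil_iff ..).mp hsrt) (by simp)
    · have hperm : (f :: rest).Perm (h :: t) := hsrt ▸ PySem.List.sorted_perm ..
      have hfmem : f ∈ h :: t := hperm.mem_iff.mp (List.mem_cons_self ..)
      have hfle : ∀ y ∈ h :: t, f ≤ y := by
        intro y hy
        simpa using PySem.List.key_head_sorted_le _ _ hsrt y hy
      obtain ⟨hmmem', hmle'⟩ := minPass_spec (h :: t) h
      have hmmem : minPass h (h :: t) ∈ h :: t := by
        rcases List.mem_cons.mp hmmem' with hm | hm
        · rw [hm]; exact List.mem_cons_self ..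
        · exact hm
      have hfm : f = minPass h (h :: t) :=
        le_antisymm (hfle _ hmmem) (hmle' f (List.mem_cons_of_mem _ hfmem))
      have hcnt : (h :: t).countP (fun x => PySem.Chars.startswith x.toList f.toList)
          = rest.countP (fun x => PySem.Chars.startswith x.toList f.toList) + 1 := by
        rw [← hperm.countP_eq]
        simp [startswith_self]
      have hA : solution (h :: t) = loopA f rest := by
        unfold solution; rw [hsrt]
      have hB : solution_alt (h :: t) = checkPass (minPass h (h :: t)) false (h :: t) := rfl
      rw [hA, hB, ← hfm, Bool.eq_iff_iff, loopA_true_iff,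
        checkPass_false_iff f (h :: t) hfmem]
      omega
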